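-- pv_equiv track=rewrite | github.com/dmosyan/CodeSignal_tasks_C-sharp | Python/equationSolutions.py | equationSolutions
-- ===== SOURCE A (Python) =====
-- def equationSolutions(l, r):
--
--     count = 0;
--     for A in range(l, r+1):
--         B = min(A+1, l)
--         while B <= r:
--             if A*A*A == B*B:
--                 count +=1
--             B+=1
--     return count
-- ===== SOURCE B (Python) =====
-- def equationSolutions(l, r):
--     # A^3 == B^2 (integers) iff A = t*t and B = +-t**3 for some t >= 0,
--     # so enumerate t with t*t <= r instead of scanning all (A, B) pairs.
--     count = 0
--     t = 0
--     while t * t <= r: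
--         if t * t >= l:
--             b = t * t * t
--             if l <= b <= r:
--                 count += 1
--             if b != 0 and l <= -b <= r:
--                 count += 1
--         t += 1
--     return count
-- ===== Notes on version B (the rewrite author's own statement) =====
-- stated objective: alternative
-- what changed: Instead of scanning all (A,B) pairs in [l,r]^2, B uses the number-theoretic fact that A^3=B^2 iff A=t^2 and B=+-t^3 for some t>=0, and enumerates only t with t^2<=r.
import Mathlib
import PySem

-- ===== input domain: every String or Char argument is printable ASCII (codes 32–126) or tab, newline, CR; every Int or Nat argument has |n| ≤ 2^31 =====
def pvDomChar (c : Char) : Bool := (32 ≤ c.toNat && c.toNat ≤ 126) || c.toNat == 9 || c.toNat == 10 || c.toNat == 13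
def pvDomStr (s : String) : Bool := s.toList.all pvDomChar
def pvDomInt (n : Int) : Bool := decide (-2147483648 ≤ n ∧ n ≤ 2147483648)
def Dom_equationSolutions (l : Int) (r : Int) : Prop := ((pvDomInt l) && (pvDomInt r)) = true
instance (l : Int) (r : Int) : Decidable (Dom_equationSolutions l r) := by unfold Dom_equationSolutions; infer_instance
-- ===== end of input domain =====

-- B replaces A's scan of all (A,B) pairs by enumerating t ≥ 0 with t*t ≤ r (A^3 = B^2 iff A = t^2, B = ±t^3); objective: alternative.

-- ===== PORT A =====
def equationSolutions (l : Int) (r : Int) : Int :=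
  (PySem.List.pyRange l (r + 1) 1).foldl (fun count A =>
    (PySem.List.pyRange (min (A + 1) l) (r + 1) 1).foldl (fun c B =>
      if A * A * A = B * B then c + 1 else c) count) 0

-- ===== PORT B =====
-- t ≤ r whenever t*t ≤ r (integers); cited by the loop's termination proof
theorem pvLe_of_sq_le (t r : Int) (h : t * t ≤ r) : t ≤ r := by
  by_cases h0 : t ≤ 0
  · exact h0.trans ((mul_self_nonneg t).trans h)
  · nlinarith

-- the 'while t*t <= r' loop of Source B, step for step
def pvAltLoop (l : Int) (r : Int) (t : Int) (count : Int) : Int :=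
  if h : t * t ≤ r then
    pvAltLoop l r (t + 1)
      (if l ≤ t * t then
        let b := t * t * t
        let count1 := if l ≤ b ∧ b ≤ r then count + 1 else count
        if b ≠ 0 ∧ l ≤ -b ∧ -b ≤ r then count1 + 1 else count1
      else count)
  else count
termination_by (r + 1 - t).toNat
decreasing_by
  have := pvLe_of_sq_le t r h
  omega

def equationSolutions_alt (l : Int) (r : Int) : Int := pvAltLoop l r 0 0

-- ===== PRECONDITION & SPEC =====
def Spec_equationSolutions (l : Int) (r : Int) (out : Int) : Prop := out = equationSolutions_alt l r
instance (l : Int) (r : Int) (out : Int) : Decidable (Spec_equationSolutions l r out) := by unfold Spec_equationSolutions; infer_instance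

-- ===== CLAIM (what is proved, stated in full; the proofs are below) =====
def Claim_equal_equationSolutions : Prop := ∀ (l : Int) (r : Int), Dom_equationSolutions l r → Spec_equationSolutions l r (equationSolutions l r)

-- ===== LEMMAS AND PROOFS =====

-- the per-t contribution of Source B's loop body (the two membership indicators)
def pvInds (l r u : Int) : Int :=
  (if l ≤ u * u * u ∧ u * u * u ≤ r then 1 else 0) +
  (if u * u * u ≠ 0 ∧ l ≤ -(u * u * u) ∧ -(u * u * u) ≤ r then 1 else 0)

-- A's inner-loop count for a fixed A
def pvG (l r A : Int) : Int :=
  ((PySem.List.pyRange l (r + 1) 1).countP (fun B => decide (A * A * A = B * B)) : Int)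

-- Source B's loop contribution at u, guards included
def pvGB (l r u : Int) : Int :=
  if u * u ≤ r then (if l ≤ u * u then pvInds l r u else 0) else 0

-- A^3 = B^2 forces A = t^2, B = ±t^3 for some t ≥ 0
theorem pvCube_eq_sq (A B : Int) (h : A * A * A = B * B) :
    ∃ t, 0 ≤ t ∧ t * t = A ∧ (B = t * t * t ∨ B = -(t * t * t)) := by
  by_cases hA : A = 0
  · refine ⟨0, le_refl 0, by simpa using hA.symm, ?_⟩
    subst hA
    have : B = 0 := by nlinarith
    simp [this]
  · have hdvd : A ^ 2 ∣ B ^ 2 := ⟨A, by ring_nf; nlinarith [h]⟩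
    have hAB : A ∣ B := (Int.pow_dvd_pow_iff two_ne_zero).mp hdvd
    obtain ⟨k, hk⟩ := hAB
    have hA2 : A * A ≠ 0 := mul_ne_zero hA hA
    have hkk : A = k * k := by
      have : A * A * A = A * A * (k * k) := by rw [h, hk]; ring
      exact mul_left_cancel₀ hA2 this
    by_cases hk0 : 0 ≤ k
    · exact ⟨k, hk0, hkk.symm, Or.inl (by rw [hk, hkk])⟩
    · exact ⟨-k, by omega, by rw [hkk]; ring, Or.inr (by rw [hk, hkk]; ring)⟩

-- count of a single value in A's B-range
theorem pvCount_pyRange (l r x : Int) :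
    ((PySem.List.pyRange l (r + 1) 1).count x : Int) = if l ≤ x ∧ x ≤ r then 1 else 0 := by
  by_cases hx : l ≤ x ∧ x ≤ r
  · rw [if_pos hx]
    have hm : x ∈ PySem.List.pyRange l (r + 1) 1 := by
      rw [PySem.List.mem_pyRange_one]; omega
    exact_mod_cast List.count_eq_one_of_mem (PySem.List.nodup_pyRange_one l (r + 1)) hm
  · rw [if_neg hx]
    have hm : x ∉ PySem.List.pyRange l (r + 1) 1 := by
      rw [PySem.List.mem_pyRange_one]; omega
    exact_mod_cast List.count_eq_zero_of_not_mem hm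

-- countP of 'B = x or B = y' on any list, x ≠ y
theorem pvCountP_or_of_ne (L : List Int) (x y : Int) (hxy : x ≠ y) :
    L.countP (fun B => decide (B = x ∨ B = y)) = L.count x + L.count y := by
  induction L with
  | nil => simp
  | cons a L ih =>
    rw [List.countP_cons, List.count_cons, List.count_cons, ih]
    by_cases hax : a = x
    · subst hax; simp [hxy]; omega
    · by_cases hay : a = y
      · subst hay; simp [hax]; omega
      · simp [hax, hay]

-- A's inner count vanishes when A is not a square of a nonnegative integer
theorem pvG_eq_zero (l r A : Int) (h : ∀ t, 0 ≤ t → t * t ≠ A) : pvG l r A = 0 := by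
  unfold pvG
  have : (PySem.List.pyRange l (r + 1) 1).countP (fun B => decide (A * A * A = B * B)) = 0 := by
    rw [List.countP_eq_zero]
    intro B _ hB
    simp only [decide_eq_true_eq] at hB
    obtain ⟨t, ht0, ht, _⟩ := pvCube_eq_sq A B hB
    exact h t ht0 ht
  rw [this]; rfl

-- countP of a single-value test is count
theorem pvCountP_eq_count (L : List Int) (x : Int) :
    L.countP (fun B => decide (B = x)) = L.count x := by
  rw [List.count_eq_countP]
  apply List.countP_congr
  intro a _
  simp [beq_iff_eq]

-- A's inner count at A = t*t equals Source B's two indicators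
theorem pvG_sq (l r t : Int) (ht : 0 ≤ t) : pvG l r (t * t) = pvInds l r t := by
  unfold pvG pvInds
  have hpred : ∀ B : Int, (t * t * (t * t) * (t * t) = B * B) ↔ (B = t * t * t ∨ B = -(t * t * t)) := by
    intro B
    constructor
    · intro hB
      have : (t * t * t) * (t * t * t) = B * B := by nlinarith [hB]
      rcases mul_self_eq_mul_self_iff.mp this with h1 | h1
      · exact Or.inl h1.symm
      · exact Or.inr (by omega)
    · rintro (h1 | h1) <;> subst h1 <;> ring
  by_cases ht0 : t = 0
  · subst ht0
    have hfn : (fun B : Int => decide ((0:Int) * 0 * (0 * 0) * (0 * 0) = B * B))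
        = fun B : Int => decide (B = (0:Int)) := by
      funext B
      have := hpred B
      simp only [mul_zero] at this ⊢
      by_cases hB : B = 0 <;> simp [hB, this]
    rw [hfn, pvCountP_eq_count, pvCount_pyRange]
    simp
  · have h3 : t * t * t ≠ 0 := by positivity
    have hcongr : (PySem.List.pyRange l (r + 1) 1).countP (fun B => decide (t * t * (t * t) * (t * t) = B * B))
        = (PySem.List.pyRange l (r + 1) 1).countP (fun B => decide (B = t * t * t ∨ B = -(t * t * t))) := by
      apply List.countP_congr
      intro B _
      simp [hpred B]
    rw [hcongr, pvCountP_or_of_ne _ _ _ (by intro hc; apply h3; omega)]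
    push_cast
    rw [pvCount_pyRange, pvCount_pyRange]
    split_ifs <;> omega

-- Source B's loop computes the sum of pvGB over [t, max(r+1,1))
theorem pvAltLoop_eq (l r : Int) :
    ∀ (n : Nat) (t c : Int), 0 ≤ t → (max (r + 1) 1 - t).toNat ≤ n →
      pvAltLoop l r t c = c + ((PySem.List.pyRange t (max (r + 1) 1) 1).map (pvGB l r)).sum := by
  intro n
  induction n with
  | zero =>
    intro t c ht hn
    have htM : max (r + 1) 1 ≤ t := by omega
    have h1 : 1 ≤ t := by omega
    have h2 : r + 1 ≤ t := by omega
    have hguard : ¬ (t * t ≤ r) := by nlinarith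
    rw [pvAltLoop, dif_neg hguard, PySem.List.pyRange_one_eq_nil htM]
    simp
  | succ n ih =>
    intro t c ht hn
    by_cases h : t * t ≤ r
    · have htr : t ≤ r := pvLe_of_sq_le t r h
      have htM : t < max (r + 1) 1 := by omega
      rw [pvAltLoop, dif_pos h, ih (t + 1) _ (by omega) (by omega),
        PySem.List.pyRange_one_cons htM]
      simp only [List.map_cons, List.sum_cons]
      unfold pvGB pvInds
      rw [if_pos h]
      split_ifs <;> ring
    · rw [pvAltLoop, dif_neg h]
      have hz : ((PySem.List.pyRange t (max (r + 1) 1) 1).map (pvGB l r)).sum = 0 := by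
        apply List.sum_eq_zero
        intro x hx
        obtain ⟨u, hu, rfl⟩ := List.mem_map.mp hx
        rw [PySem.List.mem_pyRange_one] at hu
        have : ¬ (u * u ≤ r) := by nlinarith [hu.1]
        unfold pvGB
        rw [if_neg this]
      omega

-- A's double loop is the sum of its inner counts over [l, r]
theorem pvA_eq (l r : Int) :
    equationSolutions l r = ((PySem.List.pyRange l (r + 1) 1).map (pvG l r)).sum := by
  unfold equationSolutions
  have h1 : ∀ A ∈ PySem.List.pyRange l (r + 1) 1, ∀ acc : Int,
      (PySem.List.pyRange (min (A + 1) l) (r + 1) 1).foldl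
        (fun c B => if A * A * A = B * B then c + 1 else c) acc = acc + pvG l r A := by
    intro A hA acc
    rw [PySem.List.mem_pyRange_one] at hA
    rw [min_eq_right (by omega : l ≤ A + 1)]
    exact PySem.List.foldl_ite_add_one (fun B => A * A * A = B * B) _ _
  refine Eq.trans (PySem.List.foldl_congr_mem' _ _
    (fun (acc : Int) (A : Int) => acc + pvG l r A) 0 h1) ?_
  rw [PySem.List.foldl_add]
  simp

-- reindex: the sum over A ∈ [l,r] equals the sum over t ∈ [0, max(r+1,1))
theorem pvSum_eq (l r : Int) :
    ((PySem.List.pyRange l (r + 1) 1).map (pvG l r)).sum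
      = ((PySem.List.pyRange 0 (max (r + 1) 1) 1).map (pvGB l r)).sum := by
  rw [← List.sum_toFinset _ (PySem.List.nodup_pyRange_one l (r + 1)),
      ← List.sum_toFinset _ (PySem.List.nodup_pyRange_one 0 (max (r + 1) 1))]
  have hA : (PySem.List.pyRange l (r + 1) 1).toFinset = Finset.Icc l r := by
    ext x; simp [PySem.List.mem_pyRange_one]
  have hB : (PySem.List.pyRange 0 (max (r + 1) 1) 1).toFinset = Finset.Ico 0 (max (r + 1) 1) := by
    ext x; simp [PySem.List.mem_pyRange_one]
  rw [hA, hB]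
  -- right side: keep only the u whose square lies in [l, r]
  have hRB : ∑ u ∈ Finset.Ico 0 (max (r + 1) 1), pvGB l r u
      = ∑ u ∈ (Finset.Ico 0 (max (r + 1) 1)).filter (fun u => u * u ≤ r ∧ l ≤ u * u),
          pvG l r (u * u) := by
    rw [Finset.sum_filter]
    apply Finset.sum_congr rfl
    intro u hu
    rw [Finset.mem_Ico] at hu
    unfold pvGB
    by_cases h1 : u * u ≤ r
    · by_cases h2 : l ≤ u * u
      · rw [if_pos h1, if_pos h2, if_pos ⟨h1, h2⟩]
        exact (pvG_sq l r u hu.1).symm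
      · rw [if_pos h1, if_neg h2, if_neg (by tauto)]
    · rw [if_neg h1, if_neg (by tauto)]
  -- left side: keep only the square A (pvG vanishes elsewhere)
  have hLA : ∑ A ∈ Finset.Icc l r, pvG l r A
      = ∑ A ∈ (Finset.Icc l r).filter (fun A => Int.sqrt A * Int.sqrt A = A), pvG l r A := by
    symm
    apply Finset.sum_filter_of_ne
    intro A _ hne
    by_contra hsq
    apply hne
    apply pvG_eq_zero
    intro t htt htA
    apply hsq
    rw [← htA, Int.sqrt_eq, Int.natAbs_of_nonneg htt]
  rw [hRB, hLA]
  apply Finset.sum_nbij' (i := fun A => Int.sqrt A) (j := fun u => u * u)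
  · intro A hA
    rw [Finset.mem_filter, Finset.mem_Icc] at hA
    obtain ⟨⟨hlA, hAr⟩, hsq⟩ := hA
    rw [Finset.mem_filter, Finset.mem_Ico]
    have h0 : 0 ≤ Int.sqrt A := Int.sqrt_nonneg A
    have hle : Int.sqrt A ≤ Int.sqrt A * Int.sqrt A := by nlinarith
    refine ⟨⟨h0, by omega⟩, by rw [hsq]; exact ⟨hAr, hlA⟩⟩
  · intro u hu
    rw [Finset.mem_filter, Finset.mem_Ico] at hu
    rw [Finset.mem_filter, Finset.mem_Icc]
    refine ⟨⟨hu.2.2, hu.2.1⟩, ?_⟩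
    rw [Int.sqrt_eq, Int.natAbs_of_nonneg hu.1.1]
  · intro A hA
    rw [Finset.mem_filter] at hA
    exact hA.2
  · intro u hu
    rw [Finset.mem_filter, Finset.mem_Ico] at hu
    rw [Int.sqrt_eq, Int.natAbs_of_nonneg hu.1.1]
  · intro A hA
    rw [Finset.mem_filter] at hA
    rw [hA.2]

-- ===== VERDICT (by name: the statement is the Claim_ definition above) =====
theorem equationSolutions_spec : Claim_equal_equationSolutions := by
  intro l r _
  unfold Spec_equationSolutions equationSolutions_alt
  rw [pvA_eq, pvSum_eq, pvAltLoop_eq l r (max (r + 1) 1 - 0).toNat 0 0 le_rfl le_rfl]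
  simp
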